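-- pv_equiv track=rewrite | github.com/ethanKim93/algorithm_group_study | 1005/김주호/5203_베이비진_게임/s1.py | check
-- ===== SOURCE A (Python) =====
-- def check(human):
--     cnt = 0
--     for c in human:
--         if c > 0:
--             cnt += 1
--         else:
--             cnt = 0
--
--         if c >= 3 or cnt >= 3:
--             return True
--
--     return False
-- ===== SOURCE B (Python) =====
-- def check(human):
--     if any(c >= 3 for c in human):
--         return True
--     return any(a > 0 and b > 0 and c > 0
--                for a, b, c in zip(human, human[1:], human[2:]))
-- ===== Notes on version B (the rewrite author's own statement) =====
-- stated objective: idiomatic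
-- what changed: Replaces the fused running-counter loop with early return by the OR of two independent any() predicates: any element >= 3, or any sliding window of three consecutive positives taken from zip of three shifted views.
import Mathlib
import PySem

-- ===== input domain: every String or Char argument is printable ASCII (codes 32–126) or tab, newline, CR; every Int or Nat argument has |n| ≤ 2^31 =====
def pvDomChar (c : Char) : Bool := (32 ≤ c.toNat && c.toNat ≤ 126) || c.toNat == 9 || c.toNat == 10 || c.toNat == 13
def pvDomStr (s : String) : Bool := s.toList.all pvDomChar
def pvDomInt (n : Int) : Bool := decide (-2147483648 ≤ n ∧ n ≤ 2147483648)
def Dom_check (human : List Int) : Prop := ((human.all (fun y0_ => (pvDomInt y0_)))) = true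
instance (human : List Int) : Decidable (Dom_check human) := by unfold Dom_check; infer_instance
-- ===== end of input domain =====

-- B is the OR of two independent predicates (any element >= 3; any sliding window of
-- three consecutive positives) instead of A's fused running-counter loop; same cost.
-- ===== PORT A =====
def checkAux (cnt : Int) : List Int → Bool
  | [] => false
  | c :: rest =>
    let cnt' : Int := if c > 0 then cnt + 1 else 0
    if c ≥ 3 ∨ cnt' ≥ 3 then true else checkAux cnt' rest

def check (human : List Int) : Bool := checkAux 0 human

-- ===== PORT B =====
-- sliding window over zip(human, human[1:], human[2:])
def hasWin : List Int → Bool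
  | a :: b :: c :: rest => (decide (a > 0) && decide (b > 0) && decide (c > 0)) || hasWin (b :: c :: rest)
  | _ => false

def check_alt (human : List Int) : Bool :=
  human.any (fun c => decide (c ≥ 3)) || hasWin human

-- ===== PRECONDITION & SPEC =====
def Spec_check (human : List Int) (out : Bool) : Prop := out = check_alt human
instance (human : List Int) (out : Bool) : Decidable (Spec_check human out) := by unfold Spec_check; infer_instance

-- ===== CLAIM (what is proved, stated in full; the proofs are below) =====
def Claim_equal_check : Prop := ∀ (human : List Int), Dom_check human → Spec_check human (check human)

-- ===== LEMMAS AND PROOFS =====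

-- head-run helpers (proof only)
def headPos1 : List Int → Bool
  | a :: _ => decide (a > 0)
  | _ => false

def headPos2 : List Int → Bool
  | a :: b :: _ => decide (a > 0) && decide (b > 0)
  | _ => false

def bigOrWin (l : List Int) : Bool := l.any (fun c => decide (c ≥ 3)) || hasWin l

theorem hasWin_cons (a : Int) (l : List Int) :
    hasWin (a :: l) = ((decide (a > 0) && headPos2 l) || hasWin l) := by
  match l with
  | [] => simp [hasWin, headPos2]
  | [b] => simp [hasWin, headPos2]
  | b :: c :: t => simp [hasWin, headPos2, Bool.and_assoc]

theorem headPos2_le (l : List Int) : (headPos2 l || headPos1 l) = headPos1 l := by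
  match l with
  | [] => rfl
  | [a] => simp [headPos1, headPos2]
  | a :: b :: t =>
    simp only [headPos1, headPos2]
    cases decide (a > 0) <;> simp

theorem checkAux_char (l : List Int) :
    checkAux 0 l = bigOrWin l ∧
    checkAux 1 l = (bigOrWin l || headPos2 l) ∧
    checkAux 2 l = (bigOrWin l || headPos1 l) := by
  induction l with
  | nil => simp [checkAux, bigOrWin, hasWin, headPos1, headPos2]
  | cons a t ih =>
    obtain ⟨ih0, ih1, ih2⟩ := ih
    have e2 : headPos2 (a :: t) = (decide (a > 0) && headPos1 t) := by
      match t with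
      | [] => simp [headPos1, headPos2]
      | b :: t' => simp [headPos1, headPos2]
    by_cases h3 : a ≥ 3
    · refine ⟨?_, ?_, ?_⟩ <;> simp [checkAux, bigOrWin, h3]
    · by_cases hp : a > 0
      · refine ⟨?_, ?_, ?_⟩
        · simp only [checkAux, if_pos hp, if_neg (show ¬ (a ≥ 3 ∨ (0:Int) + 1 ≥ 3) by omega)]
          rw [show (0:Int)+1 = 1 by norm_num, ih1]
          simp [bigOrWin, hasWin_cons a t, h3, hp, Bool.or_assoc, Bool.or_comm, Bool.or_left_comm]
        · simp only [checkAux, if_pos hp, if_neg (show ¬ (a ≥ 3 ∨ (1:Int) + 1 ≥ 3) by omega)]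
          rw [show (1:Int)+1 = 2 by norm_num, ih2, e2]
          simp only [bigOrWin, List.any_cons, hasWin_cons a t]
          cases h1 : headPos1 t
          · have h2 : headPos2 t = false := by
              have := headPos2_le t; rw [h1] at this; simpa using this
            simp [h2, h3, hp]
          · simp [hp]
        · simp [checkAux, hp, bigOrWin, headPos1]
      · refine ⟨?_, ?_, ?_⟩
        · simp [checkAux, hp, ih0, bigOrWin, hasWin_cons a t, h3]
        · rw [e2]; simp [checkAux, hp, ih0, bigOrWin, hasWin_cons a t, h3]
        · simp [checkAux, hp, ih0, bigOrWin, hasWin_cons a t, h3, headPos1]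

-- ===== VERDICT (by name: the statement is the Claim_ definition above) =====
theorem check_spec : Claim_equal_check := by
  intro human _
  show check human = check_alt human
  have h := (checkAux_char human).1
  simpa [check, check_alt, bigOrWin] using h
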